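-- pv_equiv track=rewrite | github.com/horimpark/code-playground | codewars/6kyu/Twisted Sum.py | compute_sum
-- ===== SOURCE A (Python) =====
-- def compute_sum(n):
--     sum = 0
--     for x in range(1, n + 1):
--         tmp = 0
--         for y in str(x):
--             tmp += int(y)
--         sum += tmp
--     return sum
-- ===== SOURCE B (Python) =====
-- def compute_sum(n):
--     # digit-sum of x via arithmetic
--     def ds(x):
--         s = 0
--         while x > 0:
--             s += x % 10
--             x //= 10
--         return s
--
--     # rec(m) = sum of digit sums of 0 .. m-1, computed per digit position
--     def rec(m):
--         if m <= 0:
--             return 0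
--         q, r = divmod(m, 10)
--         return 10 * rec(q) + 45 * q + r * ds(q) + r * (r - 1) // 2
--
--     return rec(n + 1)
-- ===== Notes on version B (the rewrite author's own statement) =====
-- stated objective: faster
-- what changed: Replaced the per-integer string-digit loop over the whole range with a closed-form digit-DP recursion that strips the last decimal digit and counts each digit position's contribution arithmetically.
import Mathlib
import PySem

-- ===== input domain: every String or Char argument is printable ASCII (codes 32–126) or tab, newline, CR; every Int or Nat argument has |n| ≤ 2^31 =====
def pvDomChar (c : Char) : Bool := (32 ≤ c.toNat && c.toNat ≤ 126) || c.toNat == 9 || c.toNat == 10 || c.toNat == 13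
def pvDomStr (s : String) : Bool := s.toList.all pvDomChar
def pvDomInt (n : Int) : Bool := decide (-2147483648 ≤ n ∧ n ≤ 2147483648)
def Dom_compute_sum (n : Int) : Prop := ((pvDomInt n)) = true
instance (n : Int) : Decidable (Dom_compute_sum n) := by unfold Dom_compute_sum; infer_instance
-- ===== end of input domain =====

-- B replaces A's per-integer string-digit loop over the whole range by a digit-DP recursion stripping one decimal digit per step (objective: faster).


-- ===== PORT A =====
-- int(y) is ported as (ofChars? [y]).getD 0; it is exact here: y ranges over the decimal
-- digits of str(x) with x ≥ 1, on which int never raises.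
def compute_sum (n : Int) : Int :=
  (PySem.List.pyRange 1 (n + 1) 1).foldl
    (fun sum x =>
      sum + ((PySem.Int.toStr x).toList.foldl
        (fun tmp y => tmp + (PySem.Int.ofChars? [y]).getD 0) 0)) 0

-- ===== PORT B =====
-- Source B's ds: while x > 0: s += x % 10; x //= 10
def dsAuxB (x s : Int) : Int :=
  if _h : 0 < x then dsAuxB (PySem.Int.floordiv x 10) (s + PySem.Int.mod x 10) else s
termination_by x.toNat
decreasing_by
  rw [PySem.Int.floordiv_eq_ediv_of_pos (by norm_num)]
  omega

def dsB (x : Int) : Int := dsAuxB x 0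

-- Source B's rec: sum of digit sums of 0 .. m-1, one decimal position per call
def recB (m : Int) : Int :=
  if h : m ≤ 0 then 0
  else
    let q := PySem.Int.floordiv m 10
    let r := PySem.Int.mod m 10
    10 * recB q + 45 * q + r * dsB q + PySem.Int.floordiv (r * (r - 1)) 2
termination_by m.toNat
decreasing_by
  rw [PySem.Int.floordiv_eq_ediv_of_pos (by norm_num)]
  omega

def compute_sum_alt (n : Int) : Int := recB (n + 1)

-- ===== PRECONDITION & SPEC =====
def Spec_compute_sum (n : Int) (out : Int) : Prop := out = compute_sum_alt n
instance (n : Int) (out : Int) : Decidable (Spec_compute_sum n out) := by unfold Spec_compute_sum; infer_instance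

-- ===== CLAIM (what is proved, stated in full; the proofs are below) =====
def Claim_equal_compute_sum : Prop := ∀ (n : Int), Dom_compute_sum n → Spec_compute_sum n (compute_sum n)

-- ===== LEMMAS AND PROOFS =====
-- digit sum of a natural number
def dsN (m : Nat) : Nat := (Nat.digits 10 m).sum
-- SN m = Σ_{k < m} dsN k
def SN : Nat → Nat
  | 0 => 0
  | k + 1 => SN k + dsN k

theorem dsN_split (m j : Nat) (hj : j < 10) : dsN (10 * m + j) = dsN m + j := by
  rcases Nat.eq_zero_or_pos (10 * m + j) with h | h
  · have hm : m = 0 ∧ j = 0 := by omega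
    simp [hm.1, hm.2]
  · unfold dsN
    rw [Nat.digits_def' (by norm_num) h]
    have h1 : (10 * m + j) % 10 = j := by omega
    have h2 : (10 * m + j) / 10 = m := by omega
    rw [h1, h2, List.sum_cons]
    omega

theorem SN_block : ∀ r : Nat, r ≤ 10 → ∀ m : Nat,
    2 * SN (10 * m + r) = 2 * SN (10 * m) + 2 * r * dsN m + r * (r - 1) := by
  intro r
  induction r with
  | zero => intro _ m; simp
  | succ s ih =>
    intro hr m
    have hstep : SN (10 * m + (s + 1)) = SN (10 * m + s) + dsN (10 * m + s) := by
      rw [show 10 * m + (s + 1) = (10 * m + s) + 1 by ring]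
      rfl
    have hd := dsN_split m s (by omega)
    have ih' := ih (by omega) m
    rw [hstep, hd]
    cases s with
    | zero => simp at ih' ⊢; omega
    | succ t =>
      simp only [Nat.add_sub_cancel] at ih' ⊢
      nlinarith [ih']

theorem SN_ten : ∀ m : Nat, SN (10 * m) = 10 * SN m + 45 * m := by
  intro m
  induction m with
  | zero => simp [SN]
  | succ k ih =>
    have hb := SN_block 10 (le_refl 10) k
    have hstep : SN (k + 1) = SN k + dsN k := rfl
    rw [show 10 * (k + 1) = 10 * k + 10 by ring]
    omega

theorem toDigitsCore_eq (fuel : Nat) : ∀ n acc, 0 < n → n < fuel →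
    Nat.toDigitsCore 10 fuel n acc = ((Nat.digits 10 n).map Nat.digitChar).reverse ++ acc := by
  induction fuel with
  | zero => intro n acc _ h; omega
  | succ f ih =>
    intro n acc hn hf
    rw [Nat.toDigitsCore]
    by_cases h0 : n / 10 = 0
    · simp only [h0, if_true]
      rw [Nat.digits_def' (by norm_num) hn, h0]
      simp
    · simp only [h0, if_false]
      rw [ih (n / 10) _ (by omega) (by omega)]
      rw [Nat.digits_def' (by norm_num) hn]
      simp

theorem charVal (d : Nat) (hd : d < 10) :
    (PySem.Int.ofChars? [Nat.digitChar d]).getD 0 = (d : Int) := by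
  interval_cases d <;> decide

theorem inner_eq (x : Int) (hx : 0 < x) :
    (PySem.Int.toStr x).toList.foldl (fun tmp y => tmp + (PySem.Int.ofChars? [y]).getD 0) 0
      = (dsN x.toNat : Int) := by
  rw [PySem.Int.toList_toStr]
  unfold PySem.Int.toChars
  rw [if_neg (by omega)]
  unfold Nat.toDigits
  rw [toDigitsCore_eq (x.toNat + 1) x.toNat [] (by omega) (by omega)]
  rw [List.append_nil, PySem.List.foldl_add]
  rw [List.map_reverse, List.sum_reverse, List.map_map]
  have hmap : (Nat.digits 10 x.toNat).map
      ((fun y => (PySem.Int.ofChars? [y]).getD 0) ∘ Nat.digitChar)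
      = (Nat.digits 10 x.toNat).map (Nat.cast : Nat → Int) := by
    apply List.map_congr_left
    intro d hd
    exact charVal d (Nat.digits_lt_base (by norm_num) hd)
  rw [hmap]
  simp [dsN, Nat.cast_list_sum]

theorem outer_eq (m : Nat) : compute_sum (m : Int) = (SN (m + 1) : Int) := by
  induction m with
  | zero =>
    unfold compute_sum
    rw [PySem.List.pyRange_one_eq_nil (by norm_num)]
    simp [SN, dsN]
  | succ k ih =>
    unfold compute_sum at ih ⊢
    have hcast : ((k + 1 : Nat) : Int) + 1 = ((k : Int) + 1) + 1 := by push_cast; ring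
    rw [hcast, PySem.List.pyRange_one_succ_right (by omega), List.foldl_append, ih]
    simp only [List.foldl_cons, List.foldl_nil]
    rw [inner_eq ((k : Int) + 1) (by omega)]
    have : ((k : Int) + 1).toNat = k + 1 := by omega
    rw [this, show SN (k + 1 + 1) = SN (k + 1) + dsN (k + 1) from rfl]
    push_cast
    ring

theorem dsAuxB_eq (x s : Int) : dsAuxB x s = s + (dsN x.toNat : Int) := by
  rw [dsAuxB]
  by_cases hx : 0 < x
  · rw [dif_pos hx]
    rw [dsAuxB_eq (PySem.Int.floordiv x 10) (s + PySem.Int.mod x 10)]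
    rw [PySem.Int.floordiv_eq_ediv_of_pos (by norm_num),
        PySem.Int.mod_eq_emod_of_pos (by norm_num)]
    have h1 : (x / 10).toNat = x.toNat / 10 := by omega
    have h2 : x % 10 = ((x.toNat % 10 : Nat) : Int) := by omega
    have h3 : dsN x.toNat = x.toNat % 10 + dsN (x.toNat / 10) := by
      unfold dsN
      rw [Nat.digits_def' (by norm_num) (by omega)]
      simp
    rw [h1, h2, h3]
    push_cast
    ring
  · rw [dif_neg hx]
    have : x.toNat = 0 := by omega
    simp [this, dsN]
termination_by x.toNat
decreasing_by
  rw [PySem.Int.floordiv_eq_ediv_of_pos (by norm_num)]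
  omega

theorem recB_eq (m : Int) : recB m = (SN m.toNat : Int) := by
  rw [recB]
  by_cases hm : m ≤ 0
  · rw [dif_pos hm]
    have : m.toNat = 0 := by omega
    simp [this, SN]
  · rw [dif_neg hm]
    simp only []
    rw [recB_eq (PySem.Int.floordiv m 10)]
    rw [dsB, dsAuxB_eq]
    rw [PySem.Int.floordiv_eq_ediv_of_pos (by norm_num),
        PySem.Int.mod_eq_emod_of_pos (by norm_num)]
    set qn := (m / 10).toNat with hqn
    have hq : m / 10 = (qn : Int) := by omega
    obtain ⟨rn, hrn, hr⟩ : ∃ rn : Nat, rn < 10 ∧ m % 10 = (rn : Int) := by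
      refine ⟨(m % 10).toNat, by omega, by omega⟩
    have hmn : m.toNat = 10 * qn + rn := by omega
    have hb := SN_block rn (by omega) qn
    have ht := SN_ten qn
    rw [PySem.Int.floordiv_eq_ediv_of_pos (by norm_num : (0:Int) < 2)]
    rw [hq, hr, hmn]
    interval_cases rn <;> omega
termination_by m.toNat
decreasing_by
  rw [PySem.Int.floordiv_eq_ediv_of_pos (by norm_num)]
  omega

-- ===== VERDICT (by name: the statement is the Claim_ definition above) =====
theorem compute_sum_spec : Claim_equal_compute_sum := by
  intro n _
  unfold Spec_compute_sum compute_sum_alt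
  rw [recB_eq]
  by_cases hn : 0 ≤ n
  · rw [show (n + 1).toNat = n.toNat + 1 by omega]
    rw [show n = ((n.toNat : Nat) : Int) by omega, outer_eq,
        show (((n.toNat : Nat) : Int)).toNat = n.toNat by omega]
  · unfold compute_sum
    rw [PySem.List.pyRange_one_eq_nil (by omega)]
    have : (n + 1).toNat = 0 := by omega
    simp [this, SN]
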